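-- pv_equiv track=rewrite | github.com/Chrisaor/StudyPython | GeeksforGeeks/Practice/2. Basic/44.RearrangeArray.py | rearrange_array
-- ===== SOURCE A (Python) =====
-- def rearrange_array(arr):
--     rearray = list()
--     for i in range(len(arr)):
--         if i % 2 == 0:
--             num = arr.pop()
--             rearray.append(num)
--         else:
--             num = arr[0]
--             del arr[0]
--             rearray.append(num)
--     return ' '.join(map(str, rearray))
-- ===== SOURCE B (Python) =====
-- def rearrange_array(arr):
--     n = len(arr)
--     merged = []
--     for x, y in zip(arr[::-1], arr):
--         merged.append(x)
--         merged.append(y)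
--     return ' '.join(map(str, merged[:n]))
-- ===== Notes on version B (the rewrite author's own statement) =====
-- stated objective: faster
-- what changed: A destructively pops the last / deletes the first element of the list n times (each front deletion is O(n)); B zips the reversed list with the forward list, flattens the pairs and truncates to n elements in one linear pass without mutating the input.
import Mathlib
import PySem

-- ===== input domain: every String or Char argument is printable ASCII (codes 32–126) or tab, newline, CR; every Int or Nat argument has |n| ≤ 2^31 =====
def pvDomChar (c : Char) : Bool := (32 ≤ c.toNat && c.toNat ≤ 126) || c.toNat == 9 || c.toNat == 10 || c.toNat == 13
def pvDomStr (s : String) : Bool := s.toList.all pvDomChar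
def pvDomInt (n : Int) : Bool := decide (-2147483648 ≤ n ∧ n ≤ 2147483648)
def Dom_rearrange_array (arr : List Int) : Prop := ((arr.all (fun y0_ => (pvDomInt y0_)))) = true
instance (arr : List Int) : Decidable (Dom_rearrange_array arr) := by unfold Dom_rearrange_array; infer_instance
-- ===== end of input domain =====

-- B replaces A's quadratic pop/del loop by a linear zip of the reversed and the forward list,
-- truncated to length n (return value only: A empties its argument in place, B does not mutate it).

-- ===== PORT A =====
-- one iteration of A's loop body: even i pops the last element, odd i deletes the first
def pvStepA (st : List Int × List Int) (i : Int) : List Int × List Int :=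
  if PySem.Int.mod i 2 == 0 then
    match PySem.List.pop? st.1 (-1) with
    | some (num, rest) => (rest, st.2 ++ [num])
    | none => st            -- unreachable: the loop runs exactly st.1.length times
  else
    match st.1 with
    | [] => st              -- unreachable guard for 'arr[0]' / 'del arr[0]'
    | num :: rest => (rest, st.2 ++ [num])

def rearrange_array (arr : List Int) : String :=
  let st := (PySem.List.pyRange 0 (arr.length : Int) 1).foldl pvStepA (arr, ([] : List Int))
  PySem.Str.join " " (st.2.map PySem.Int.toStr)

-- ===== PORT B =====
def rearrange_array_alt (arr : List Int) : String :=
  let n := arr.length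
  let rev := (PySem.List.slice? arr none none (-1)).getD []   -- arr[::-1]; step ≠ 0, never none
  let merged := (rev.zip arr).foldl (fun acc p => acc ++ [p.1, p.2]) ([] : List Int)
  PySem.Str.join " " ((PySem.List.slice merged none (some (n : Int))).map PySem.Int.toStr)

-- ===== PRECONDITION & SPEC =====
def Spec_rearrange_array (arr : List Int) (out : String) : Prop := out = rearrange_array_alt arr
instance (arr : List Int) (out : String) : Decidable (Spec_rearrange_array arr out) := by unfold Spec_rearrange_array; infer_instance

-- ===== CLAIM (what is proved, stated in full; the proofs are below) =====
def Claim_equal_rearrange_array : Prop := ∀ (arr : List Int), Dom_rearrange_array arr → Spec_rearrange_array arr (rearrange_array arr)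

-- ===== LEMMAS AND PROOFS =====

-- the common value: alternately take the last and the first element of the remaining list
def interl : List Int → List Int
  | [] => []
  | [x] => [x]
  | x :: y :: rest =>
      (y :: rest).getLast (by simp) :: x :: interl ((y :: rest).dropLast)
termination_by l => l.length
decreasing_by simp [List.length_dropLast]

lemma interl_two (x y : Int) (rest : List Int) :
    interl (x :: y :: rest)
      = (y :: rest).getLast (by simp) :: x :: interl ((y :: rest).dropLast) := by
  simp [interl]

lemma stepA_even (l acc : List Int) (i : Int) (h : PySem.Int.mod i 2 = 0) (hne : l ≠ []) :
    pvStepA (l, acc) i = (l.dropLast, acc ++ [l.getLast hne]) := by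
  have hpop : PySem.List.pop? l (-1) = some (l.getLast hne, l.dropLast) := by
    conv_lhs => rw [← List.dropLast_append_getLast (l := l) hne]
    exact PySem.List.pop?_last _ _
  unfold pvStepA
  rw [if_pos (show (PySem.Int.mod i 2 == 0) = true from by simp only [beq_iff_eq]; exact h), hpop]

lemma stepA_odd (x : Int) (rest acc : List Int) (i : Int) (h : ¬ PySem.Int.mod i 2 = 0) :
    pvStepA (x :: rest, acc) i = (rest, acc ++ [x]) := by
  unfold pvStepA
  rw [if_neg (show ¬ (PySem.Int.mod i 2 == 0) = true from by simp only [beq_iff_eq]; exact h)]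

lemma loopA (n : Nat) : ∀ (l acc : List Int) (i : Int),
    l.length = n → PySem.Int.mod i 2 = 0 →
    (PySem.List.pyRange i (i + (l.length : Int)) 1).foldl pvStepA (l, acc)
      = ([], acc ++ interl l) := by
  induction n using Nat.strong_induction_on with
  | _ n ih =>
    intro l acc i hlen hmod
    match l with
    | [] => simp [PySem.List.pyRange_one_eq_nil, interl]
    | [x] =>
        rw [show (i + (([x] : List Int).length : Int)) = i + 1 by norm_num,
            PySem.List.pyRange_one_cons (by omega), PySem.List.pyRange_one_eq_nil (by omega),
            List.foldl_cons, stepA_even [x] acc i hmod (by simp), List.foldl_nil]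
        simp [interl]
    | x :: y :: rest =>
        have hmod1 : ¬ PySem.Int.mod (i + 1) 2 = 0 := by
          rw [PySem.Int.mod_eq_emod_of_pos (by norm_num)] at hmod ⊢; omega
        have hmod2 : PySem.Int.mod (i + 1 + 1) 2 = 0 := by
          rw [PySem.Int.mod_eq_emod_of_pos (by norm_num)] at hmod ⊢; omega
        have hlen2 : (y :: rest).dropLast.length = n - 2 := by
          simp at hlen ⊢; omega
        rw [PySem.List.pyRange_one_cons (by simp; omega), List.foldl_cons,
            stepA_even _ acc i hmod (by simp),
            show (x :: y :: rest).dropLast = x :: (y :: rest).dropLast from rfl,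
            show (x :: y :: rest).getLast (by simp) = (y :: rest).getLast (by simp) from
              List.getLast_cons (by simp),
            PySem.List.pyRange_one_cons (by simp), List.foldl_cons,
            stepA_odd x _ _ (i + 1) hmod1,
            show i + ((x :: y :: rest).length : Int)
                = (i + 1 + 1) + ((y :: rest).dropLast.length : Int) from by
              simp; ring,
            ih (n - 2) (by simp at hlen; omega) _ _ (i + 1 + 1) hlen2 hmod2,
            interl_two x y rest]
        simp

lemma length_flat_pairs (L : List (Int × Int)) :
    (L.foldl (fun acc p => acc ++ [p.1, p.2]) ([] : List Int)).length = 2 * L.length := by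
  rw [PySem.List.foldl_append_eq_flatMap]
  induction L with
  | nil => simp
  | cons p L ih => simp at ih ⊢; omega

lemma flat_pairs_append (L M : List (Int × Int)) :
    (L ++ M).foldl (fun acc p => acc ++ [p.1, p.2]) ([] : List Int)
      = L.foldl (fun acc p => acc ++ [p.1, p.2]) ([] : List Int)
        ++ M.foldl (fun acc p => acc ++ [p.1, p.2]) ([] : List Int) := by
  simp only [PySem.List.foldl_append_eq_flatMap]
  simp

lemma flat_pairs_start (L : List (Int × Int)) (a b : Int) :
    L.foldl (fun acc p => acc ++ [p.1, p.2]) ([a, b] : List Int)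
      = a :: b :: L.foldl (fun acc p => acc ++ [p.1, p.2]) ([] : List Int) := by
  simp only [PySem.List.foldl_append_eq_flatMap]
  simp

lemma interl_eq_take_flat (n : Nat) : ∀ (l : List Int), l.length = n →
    interl l
      = ((l.reverse.zip l).foldl (fun acc p => acc ++ [p.1, p.2]) ([] : List Int)).take l.length := by
  induction n using Nat.strong_induction_on with
  | _ n ih =>
    intro l hlen
    match l with
    | [] => simp [interl]
    | [x] => simp [interl]
    | x :: y :: rest =>
        obtain ⟨ys, z, hyz⟩ : ∃ ys z, (y :: rest) = ys ++ [z] :=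
          ⟨_, _, (List.dropLast_append_getLast (l := y :: rest) (by simp)).symm⟩
        have hlys : ys.length = n - 2 := by
          rw [hyz] at hlen; simp at hlen; omega
        have hrev : (x :: y :: rest).reverse = z :: (ys.reverse ++ [x]) := by
          rw [hyz]; simp
        have hzip : ((x :: y :: rest).reverse.zip (x :: y :: rest))
            = (z, x) :: ((ys.reverse.zip ys) ++ [(x, z)]) := by
          rw [hrev]
          conv_lhs => rw [hyz]
          rw [List.zip_cons_cons, List.zip_append (by simp)]
          simp
        rw [interl_two x y rest,
            show (y :: rest).getLast (by simp) = z from by simp [hyz],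
            show (y :: rest).dropLast = ys from by simp [hyz],
            hzip, List.foldl_cons]
        simp only [List.nil_append]
        rw [flat_pairs_start,
            show (x :: y :: rest).length = ys.length + 2 from by rw [hyz]; simp,
            List.take_succ_cons, List.take_succ_cons,
            flat_pairs_append,
            List.take_append_of_le_length
              (by rw [length_flat_pairs, List.length_zip, List.length_reverse]; omega),
            ← ih (n - 2) (by simp at hlen; omega) ys hlys]

-- ===== VERDICT (by name: the statement is the Claim_ definition above) =====
theorem rearrange_array_spec : Claim_equal_rearrange_array := by
  intro arr _
  unfold Spec_rearrange_array
  simp only [rearrange_array, rearrange_array_alt,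
    PySem.List.slice?_none_none_neg_one, Option.getD_some]
  have h0 : (PySem.List.pyRange 0 (arr.length : Int) 1).foldl pvStepA (arr, ([] : List Int))
      = ([], [] ++ interl arr) := by
    have := loopA arr.length arr [] 0 rfl (by decide)
    rwa [zero_add] at this
  rw [h0, PySem.List.slice_to_natCast,
      interl_eq_take_flat arr.length arr rfl]
  simp
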